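-- pv_equiv track=rewrite | github.com/ckoons/BubbleSpacetimeTheory | play/toy_334_cycle_independence.py | compute_betti1
-- ===== SOURCE A (Python) =====
-- from collections import defaultdict, deque
--
-- def compute_betti1(adj, n):
--     """beta_1 = edges - vertices + components."""
--     edges = sum(len(adj[v]) for v in range(n)) // 2
--     visited = [False] * n; comp = 0
--     for s in range(n):
--         if not visited[s]:
--             comp += 1; queue = deque([s]); visited[s] = True
--             while queue:
--                 u = queue.popleft()
--                 for v in adj[u]:
--                     if not visited[v]:
--                         visited[v] = True; queue.append(v)
--     return edges - n + comp
-- ===== SOURCE B (Python) =====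
-- def compute_betti1(adj, n):
--     """beta_1 = edges - vertices + components (components counted with union-find)."""
--     edges = sum(len(adj[v]) for v in range(n)) // 2
--     parent = {i: i for i in range(n)}
--
--     def find(x):
--         while parent[x] != x:
--             x = parent[x]
--         return x
--
--     for v in range(n):
--         for u in adj[v]:
--             parent[find(u)] = find(v)
--     comp = sum(1 for i in range(n) if parent[i] == i)
--     return edges - n + comp
-- ===== Notes on version B (the rewrite author's own statement) =====
-- stated objective: alternative
-- what changed: A's BFS flood (deque + boolean visited array) for counting components is replaced by a union-find (disjoint-set) structure: every edge unions its endpoints' roots and the component count is the number of keys that remain their own parent.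
-- outside the precondition, e.g. on compute_betti1({0: [], 1: [0]}, 2): A returns 0, B returns -1; on compute_betti1({0: [1, -1], 1: [0], 2: [], -1: []}, 3): A returns -1, B raises KeyError
import Mathlib
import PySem

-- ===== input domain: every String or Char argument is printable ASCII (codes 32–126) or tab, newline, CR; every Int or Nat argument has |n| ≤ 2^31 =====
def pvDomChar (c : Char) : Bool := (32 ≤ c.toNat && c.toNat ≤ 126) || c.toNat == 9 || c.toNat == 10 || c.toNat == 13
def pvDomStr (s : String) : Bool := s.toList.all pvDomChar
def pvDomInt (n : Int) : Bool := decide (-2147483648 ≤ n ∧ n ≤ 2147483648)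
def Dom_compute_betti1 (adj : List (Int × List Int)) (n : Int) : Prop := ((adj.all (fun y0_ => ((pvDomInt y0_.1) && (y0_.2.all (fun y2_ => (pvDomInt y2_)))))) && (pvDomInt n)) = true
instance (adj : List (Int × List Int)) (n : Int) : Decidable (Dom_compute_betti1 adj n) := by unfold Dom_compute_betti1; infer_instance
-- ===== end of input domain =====

-- B replaces A's BFS flood (deque + boolean visited array) by a union-find structure: every edge
-- unions its endpoints' roots and the component count is the number of remaining roots.
-- Equivalence is about the return value; neither program mutates its arguments observably.

-- ===== PORT A =====
-- adj[v]: Python dict lookup; Pre_ guarantees every looked-up key is present, so getD is exact there.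
def pvNbr (adj : List (Int × List Int)) (u : Int) : List Int := PySem.Dict.getD (PySem.Dict.mk adj) u []

-- one neighbour step of A's BFS inner loop (named so the proofs below match it syntactically)
def pvStepA (s : List Bool × List Int) (v : Int) : List Bool × List Int :=
  if v.toNat < s.1.length ∧ s.1.getD v.toNat false = false
  then (s.1.set v.toNat true, s.2 ++ [v]) else s

-- termination helper for the BFS loop: flipping a false entry lowers the false-count
lemma pvCountSetFalse (xs : List Bool) (i : Nat) (hi : i < xs.length)
    (hx : xs.getD i false = false) : (xs.set i true).count false + 1 = xs.count false := by
  induction xs generalizing i with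
  | nil => simp at hi
  | cons a t ih =>
    cases i with
    | zero =>
      have ha : a = false := by simpa using hx
      subst ha; simp
    | succ j =>
      have hj : j < t.length := by simpa using hi
      have hx' : t.getD j false = false := by simpa using hx
      have h2 := ih j hj hx'
      simp only [List.set_cons_succ, List.count_cons]
      omega

-- termination helper: the inner neighbour fold preserves (#false in visited) + (queue length)
lemma pvFoldA_measure (l : List Int) (vis : List Bool) (q : List Int) :
    (l.foldl (pvStepA) (vis, q)).1.count false
    + (l.foldl (pvStepA) (vis, q)).2.length
    ≤ vis.count false + q.length := by
  induction l generalizing vis q with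
  | nil => simp
  | cons v t ih =>
    simp only [List.foldl_cons]
    by_cases h : v.toNat < vis.length ∧ vis.getD v.toNat false = false
    · rw [pvStepA, if_pos h]
      have h1 := pvCountSetFalse vis v.toNat h.1 h.2
      have h2 := ih (vis.set v.toNat true) (q ++ [v])
      simp only [List.length_append, List.length_cons, List.length_nil] at h2 ⊢
      omega
    · rw [pvStepA, if_neg h]
      exact ih vis q

-- the `while queue:` BFS loop of A; `v.toNat < len` is a totality guard only — Pre_ keeps every
-- checked index v inside [0, n), where `getD v.toNat`/`set v.toNat` are exactly Python's visited[v]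
def pvFloodA (g : Int → List Int) (vis : List Bool) (q : List Int) : List Bool :=
  match q with
  | [] => vis
  | u :: qs =>
    let p := (g u).foldl (pvStepA) (vis, qs)
    pvFloodA g p.1 p.2
  termination_by vis.count false + q.length
  decreasing_by
    have h := pvFoldA_measure (g u) vis qs
    simp only [List.length_cons]
    omega

-- one outer-loop step of A: `if not visited[s]: comp += 1; flood from s`
def pvOutA (g : Int → List Int) (s : List Bool × Int) (i : Int) : List Bool × Int :=
  if s.1.getD i.toNat false = false then (pvFloodA g (s.1.set i.toNat true) [i], s.2 + 1) else s

def compute_betti1 (adj : List (Int × List Int)) (n : Int) : Int :=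
  PySem.Int.floordiv
      ((PySem.List.pyRange 0 n 1).foldl (fun a v => a + ((pvNbr adj v).length : Int)) 0) 2
    - n
    + ((PySem.List.pyRange 0 n 1).foldl (pvOutA (pvNbr adj))
        (List.replicate n.toNat false, 0)).2

-- ===== PORT B =====
-- B's `while parent[x] != x: x = parent[x]`; the fuel (n in the caller) is a totality guard only:
-- Pre_ keeps every argument a key of parent, where `getD x x` is exactly Python's parent[x]
def pvFind (parent : PySem.Dict Int Int) : Nat → Int → Int
  | 0, x => x
  | fuel + 1, x =>
    let p := PySem.Dict.getD parent x x
    if p = x then x else pvFind parent fuel p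

-- one union step of B: `parent[find(u)] = find(v)`
def pvUnionStep (fuel : Nat) (par : PySem.Dict Int Int) (v u : Int) : PySem.Dict Int Int :=
  PySem.Dict.insert par (pvFind par fuel u) (pvFind par fuel v)

def compute_betti1_alt (adj : List (Int × List Int)) (n : Int) : Int :=
  let edges := PySem.Int.floordiv
      ((PySem.List.pyRange 0 n 1).foldl (fun a v => a + ((pvNbr adj v).length : Int)) 0) 2
  -- parent = {i: i for i in range(n)}
  let parent0 := (PySem.List.pyRange 0 n 1).foldl
      (fun d i => PySem.Dict.insert d i i) PySem.Dict.empty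
  -- for v in range(n): for u in adj[v]: parent[find(u)] = find(v)
  let parent := (PySem.List.pyRange 0 n 1).foldl
      (fun par v => (pvNbr adj v).foldl (fun par u => pvUnionStep n.toNat par v u) par) parent0
  -- comp = sum(1 for i in range(n) if parent[i] == i)
  let comp := (PySem.List.pyRange 0 n 1).foldl
      (fun c i => c + (if PySem.Dict.getD parent i i = i then 1 else 0)) 0
  edges - n + comp

-- ===== PRECONDITION & SPEC =====
-- Pre_ restricts to the task's natural domain, finite UNDIRECTED graphs on vertices 0..n-1: every
-- vertex 0..n-1 a key of adj (stated by counting the distinct in-range keys, so it decides fast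
-- for any n), every neighbour again a vertex in [0, n), and adjacency symmetric.  Outside it A
-- raises KeyError/IndexError on most inputs (a missing key, a neighbour ≥ n or < -n), and the
-- remaining inputs — a directed adjacency, or a negative neighbour label — are malformed for this
-- function (its edge count sum(deg)//2 and its docstring presume an undirected graph), where A's
-- start-order-dependent count and B's undirected merge are both defensible readings.
def Pre_compute_betti1 (adj : List (Int × List Int)) (n : Int) : Prop :=
  (n ≤ ((PySem.Set.ofList ((adj.map Prod.fst).filter
      (fun k => decide (0 ≤ k ∧ k < n)))).length : Int)) ∧
  ∀ k ∈ adj.map Prod.fst, (0 ≤ k ∧ k < n) →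
    ∀ u ∈ PySem.Dict.getD (PySem.Dict.mk adj) k [],
      (0 ≤ u ∧ u < n) ∧ k ∈ PySem.Dict.getD (PySem.Dict.mk adj) u []
instance (adj : List (Int × List Int)) (n : Int) : Decidable (Pre_compute_betti1 adj n) := by
  unfold Pre_compute_betti1; infer_instance

def pvWitness_compute_betti1 : (List (Int × List Int)) × Int := ([(0, [1]), (1, [0]), (2, [])], 3)

def Spec_compute_betti1 (adj : List (Int × List Int)) (n : Int) (out : Int) : Prop := out = compute_betti1_alt adj n
instance (adj : List (Int × List Int)) (n : Int) (out : Int) : Decidable (Spec_compute_betti1 adj n out) := by unfold Spec_compute_betti1; infer_instance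

-- ===== CLAIM (what is proved, stated in full; the proofs are below) =====
def Claim_equal_compute_betti1 : Prop := ∀ (adj : List (Int × List Int)) (n : Int), Dom_compute_betti1 adj n → Pre_compute_betti1 adj n → Spec_compute_betti1 adj n (compute_betti1 adj n)

-- ===== LEMMAS AND PROOFS =====

-- x is a vertex: 0 ≤ x < n (abbrev so `decide` finds the And instance)
abbrev pvInR (n x : Int) : Prop := 0 ≤ x ∧ x < n

-- one flood step: an in-range, unmarked neighbour
def pvRel (g : Int → List Int) (n : Int) (m : Int → Bool) (a b : Int) : Prop :=
  b ∈ g a ∧ pvInR n b ∧ m b = false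

-- what a worklist flood computes: already marked, or reachable from the worklist avoiding marks
def pvReach (g : Int → List Int) (n : Int) (m : Int → Bool) (W : List Int) (x : Int) : Prop :=
  m x = true ∨ ∃ w ∈ W, Relation.ReflTransGen (pvRel g n m) w x

-- the marking a visited list represents (false off-range, so aliasing via toNat is harmless)
def pvMark (n : Int) (vis : List Bool) (x : Int) : Bool :=
  decide (pvInR n x) && vis.getD x.toNat false

lemma pvRelMono (g : Int → List Int) (n : Int) (m m' : Int → Bool)
    (h : ∀ b, m b = true → m' b = true) {a b : Int}
    (hab : Relation.ReflTransGen (pvRel g n m') a b) :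
    Relation.ReflTransGen (pvRel g n m) a b := by
  refine Relation.ReflTransGen.mono ?_ hab
  rintro x y ⟨h1, h2, h3⟩
  refine ⟨h1, h2, ?_⟩
  cases hy : m y
  · rfl
  · exact absurd (h y hy) (by simp [h3])

-- frontier advance: processing u rewrites the reach set from (m, u::qs) to (m', W')
lemma pvAdvance (g : Int → List Int) (n : Int) (m m' : Int → Bool) (u : Int)
    (qs W' : List Int) (hu : m u = true)
    (hm' : ∀ x, m' x = true ↔ (m x = true ∨ (x ∈ g u ∧ pvInR n x)))
    (hW' : ∀ x, x ∈ W' ↔ (x ∈ qs ∨ (x ∈ g u ∧ pvInR n x ∧ m x = false))) :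
    ∀ x, pvReach g n m' W' x ↔ pvReach g n m (u :: qs) x := by
  have hmono : ∀ b, m b = true → m' b = true := fun b hb => (hm' b).mpr (Or.inl hb)
  have H' : ∀ w x, Relation.ReflTransGen (pvRel g n m) w x →
      (m' x = true ∨ (∃ w' ∈ W', Relation.ReflTransGen (pvRel g n m') w' x) ∨
        Relation.ReflTransGen (pvRel g n m') w x) := by
    intro w x hwx
    induction hwx using Relation.ReflTransGen.head_induction_on with
    | refl => exact Or.inr (Or.inr Relation.ReflTransGen.refl)
    | head hrel hrest ih =>
      rcases ih with h1 | h2 | h3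
      · exact Or.inl h1
      · exact Or.inr (Or.inl h2)
      · rename_i a c
        by_cases hc : m' c = true
        · rcases (hm' c).mp hc with hmc | ⟨hcg, hcr⟩
          · exact absurd hmc (by simp [hrel.2.2])
          · exact Or.inr (Or.inl ⟨c, (hW' c).mpr (Or.inr ⟨hcg, hcr, hrel.2.2⟩), h3⟩)
        · exact Or.inr (Or.inr (h3.head ⟨hrel.1, hrel.2.1, by simpa using hc⟩))
  intro x
  constructor
  · rintro (hm'x | ⟨w', hw', hp⟩)
    · rcases (hm' x).mp hm'x with hmx | ⟨hxg, hxr⟩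
      · exact Or.inl hmx
      · by_cases hx : m x = true
        · exact Or.inl hx
        · exact Or.inr ⟨u, List.mem_cons_self ..,
            Relation.ReflTransGen.single ⟨hxg, hxr, by simpa using hx⟩⟩
    · have hp' := pvRelMono g n m m' hmono hp
      rcases (hW' w').mp hw' with hq | ⟨hg1, hg2, hg3⟩
      · exact Or.inr ⟨w', List.mem_cons_of_mem _ hq, hp'⟩
      · exact Or.inr ⟨u, List.mem_cons_self .., hp'.head ⟨hg1, hg2, hg3⟩⟩
  · rintro (hmx | ⟨w, hw, hp⟩)
    · exact Or.inl (hmono x hmx)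
    · rcases H' w x hp with h1 | h2 | h3
      · exact Or.inl h1
      · exact Or.inr h2
      · rcases List.mem_cons.mp hw with heq2 | hwqs
        · subst heq2
          rcases (Relation.ReflTransGen.cases_head h3) with heq | ⟨c, hac, hcx⟩
          · exact Or.inl (heq ▸ hmono _ hu)
          · have hmc : m c = false := by
              cases hyc : m c
              · rfl
              · exact absurd (hmono c hyc) (by simp [hac.2.2])
            exact Or.inr ⟨c, (hW' c).mpr (Or.inr ⟨hac.1, hac.2.1, hmc⟩), hcx⟩
        · exact Or.inr ⟨w, (hW' w).mpr (Or.inl hwqs), h3⟩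

lemma pvGetDSet (xs : List Bool) (i j : Nat) (hi : i < xs.length) :
    (xs.set i true).getD j false = if j = i then true else xs.getD j false := by
  by_cases h : j = i
  · subst h
    simp [List.getD_eq_getElem?_getD, hi]
  · have h' : i ≠ j := fun hh => h hh.symm
    simp [List.getD_eq_getElem?_getD, h', h]

-- marking one in-range vertex, seen through pvMark
lemma pvMarkSet (n : Int) (vis : List Bool) (v x : Int) (hv : pvInR n v)
    (hlen : (vis.length : Int) = n) :
    pvMark n (vis.set v.toNat true) x = (pvMark n vis x || decide (x = v)) := by
  unfold pvMark
  by_cases hx : pvInR n x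
  · have hvl : v.toNat < vis.length := by unfold pvInR at hv; omega
    rw [pvGetDSet vis v.toNat x.toNat hvl]
    by_cases hxv : x = v
    · subst hxv; simp [hx]
    · have hne : x.toNat ≠ v.toNat := by unfold pvInR at hx hv; omega
      simp [hne, hxv]
  · have hxv : x ≠ v := fun h => hx (h ▸ hv)
    simp [hx, hxv]

-- characterization of A's inner neighbour fold
lemma pvFoldACharacter (l : List Int) (n : Int) (vis : List Bool) (q : List Int)
    (hlen : (vis.length : Int) = n) (hl : ∀ v ∈ l, pvInR n v) :
    (l.foldl (pvStepA) (vis, q)).1.length = vis.length ∧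
    (∀ x, pvMark n (l.foldl (pvStepA) (vis, q)).1 x = true
      ↔ (pvMark n vis x = true ∨ x ∈ l)) ∧
    (∀ x, x ∈ (l.foldl (pvStepA) (vis, q)).2
      ↔ (x ∈ q ∨ (x ∈ l ∧ pvInR n x ∧ pvMark n vis x = false))) := by
  induction l generalizing vis q with
  | nil => simp
  | cons v t ih =>
    have hv : pvInR n v := hl v (List.mem_cons_self ..)
    have hvl : v.toNat < vis.length := by unfold pvInR at hv; omega
    simp only [List.foldl_cons]
    by_cases hguard : v.toNat < vis.length ∧ vis.getD v.toNat false = false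
    · have hstep : pvStepA (vis, q) v = (vis.set v.toNat true, q ++ [v]) := by
        simp only [pvStepA]; rw [if_pos hguard]
      rw [hstep]
      obtain ⟨ih1, ih2, ih3⟩ := ih (vis.set v.toNat true) (q ++ [v])
        (by rw [List.length_set]; exact hlen)
        (fun w hw => hl w (List.mem_cons_of_mem _ hw))
      have hgd2 : vis[v.toNat]?.getD false = false := by
        rw [← List.getD_eq_getElem?_getD]; exact hguard.2
      refine ⟨by rw [ih1, List.length_set], ?_, ?_⟩
      · intro x
        rw [ih2, pvMarkSet n vis v x hv hlen]
        by_cases hxv : x = v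
        · subst hxv; simp
        · simp [List.mem_cons, hxv]
      · intro x
        rw [ih3, pvMarkSet n vis v x hv hlen]
        by_cases hxv : x = v
        · subst hxv
          simp [List.mem_append, List.mem_cons, hv, hgd2, pvMark]
          exact Or.inr hv
        · simp [List.mem_append, List.mem_cons, hxv]
    · have h2 : vis.getD v.toNat false = true := by
        rcases not_and_or.mp hguard with h | h
        · exact absurd hvl h
        · simpa using h
      have hgd2 : vis[v.toNat]?.getD false = true := by
        rw [← List.getD_eq_getElem?_getD]; exact h2
      have hstep : pvStepA (vis, q) v = (vis, q) := by
        simp only [pvStepA]; rw [if_neg hguard]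
      rw [hstep]
      obtain ⟨ih1, ih2, ih3⟩ := ih vis q hlen (fun w hw => hl w (List.mem_cons_of_mem _ hw))
      refine ⟨ih1, ?_, ?_⟩
      · intro x
        rw [ih2]
        by_cases hxv : x = v
        · subst hxv; simp [pvMark, hv, hgd2]
        · simp [List.mem_cons, hxv]
      · intro x
        rw [ih3]
        by_cases hxv : x = v
        · subst hxv; simp [pvMark, hv, hgd2]
        · simp [List.mem_cons, hxv]

-- A's BFS flood marks exactly pvReach (and keeps the list length)
lemma pvFloodASpec (g : Int → List Int) (n : Int)
    (hg : ∀ u, pvInR n u → ∀ v ∈ g u, pvInR n v) :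
    ∀ (vis : List Bool) (q : List Int), (vis.length : Int) = n →
    (∀ w ∈ q, pvInR n w ∧ pvMark n vis w = true) →
    (pvFloodA g vis q).length = vis.length ∧
    (∀ x, pvMark n (pvFloodA g vis q) x = true ↔ pvReach g n (pvMark n vis) q x) := by
  intro vis q
  induction vis, q using pvFloodA.induct g with
  | case1 vis =>
    intro _ _
    rw [pvFloodA]
    refine ⟨rfl, fun x => ?_⟩
    unfold pvReach
    simp
  | case2 vis u qs p ih =>
    intro hlen hq
    obtain ⟨hu1, hu2⟩ := hq u (List.mem_cons_self ..)
    have hl : ∀ v ∈ g u, pvInR n v := hg u hu1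
    obtain ⟨c1, c2, c3⟩ := pvFoldACharacter (g u) n vis qs hlen hl
    have hlen' : ((p.1.length : Nat) : Int) = n := by rw [c1]; exact hlen
    have hq' : ∀ w ∈ p.2, pvInR n w ∧ pvMark n p.1 w = true := by
      intro w hw
      rcases (c3 w).mp hw with hwq | ⟨hwg, hwr, _⟩
      · obtain ⟨hw1, hw2⟩ := hq w (List.mem_cons_of_mem _ hwq)
        exact ⟨hw1, (c2 w).mpr (Or.inl hw2)⟩
      · exact ⟨hwr, (c2 w).mpr (Or.inr hwg)⟩
    obtain ⟨ihl, ihm⟩ := ih hlen' hq'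
    have hadv := pvAdvance g n (pvMark n vis) (pvMark n p.1) u qs p.2 hu2
      (fun x => by
        rw [c2 x]
        constructor
        · rintro (h | h)
          · exact Or.inl h
          · exact Or.inr ⟨h, hl x h⟩
        · rintro (h | ⟨h, _⟩)
          · exact Or.inl h
          · exact Or.inr h)
      (fun x => c3 x)
    constructor
    · rw [pvFloodA]
      exact ihl.trans c1
    · intro x
      rw [pvFloodA]
      rw [ihm x]
      exact hadv x

-- ===== union-find machinery =====

-- the parent-pointer function a parent dict denotes (`parent[x]`, with x itself as the guard default)
def pvP (par : PySem.Dict Int Int) (x : Int) : Int := PySem.Dict.getD par x x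

def pvIsRoot (par : PySem.Dict Int Int) (x : Int) : Prop := pvP par x = x

-- number of non-root vertices (bounds every parent-chain's length)
def pvCnt (n : Int) (par : PySem.Dict Int Int) : Nat :=
  (List.range n.toNat).countP (fun i : Nat => decide (pvP par (i : Int) ≠ (i : Int)))

lemma pvCnt_le (n : Int) (par : PySem.Dict Int Int) : pvCnt n par ≤ n.toNat := by
  unfold pvCnt
  have h := List.countP_le_length (l := List.range n.toNat)
    (p := fun i : Nat => decide (pvP par (i : Int) ≠ (i : Int)))
  simpa using h

-- pvFind follows the parent chain to its fixpoint, whenever one is reached within the fuel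
lemma pvFind_spec (par : PySem.Dict Int Int) :
    ∀ (fuel k : Nat) (x : Int), k ≤ fuel →
    pvIsRoot par ((pvP par)^[k] x) → pvFind par fuel x = (pvP par)^[k] x := by
  intro fuel
  induction fuel with
  | zero =>
    intro k x hk _
    interval_cases k
    simp [pvFind]
  | succ f ih =>
    intro k x hk hroot
    show (if pvP par x = x then x else pvFind par f (pvP par x)) = _
    by_cases hx : pvP par x = x
    · rw [if_pos hx, Function.iterate_fixed hx]
    · rw [if_neg hx]
      cases k with
      | zero => exact absurd hroot hx
      | succ j =>
        rw [Function.iterate_succ_apply] at hroot ⊢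
        exact ih j (pvP par x) (Nat.le_of_succ_le_succ hk) hroot

-- pvFind only looks at the denoted pointer function
lemma pvFindCongr (par par' : PySem.Dict Int Int) (h : ∀ x, pvP par' x = pvP par x) :
    ∀ (fuel : Nat) (x : Int), pvFind par' fuel x = pvFind par fuel x := by
  intro fuel
  induction fuel with
  | zero => intro x; rfl
  | succ f ih =>
    intro x
    show (if pvP par' x = x then x else pvFind par' f (pvP par' x)) =
      (if pvP par x = x then x else pvFind par f (pvP par x))
    rw [h x]
    by_cases hx : pvP par x = x
    · rw [if_pos hx, if_pos hx]
    · rw [if_neg hx, if_neg hx, ih]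

lemma pvP_insert (par : PySem.Dict Int Int) (k w x : Int) :
    pvP (PySem.Dict.insert par k w) x = if x = k then w else pvP par x := by
  unfold pvP
  rw [PySem.Dict.getD_insert]

-- the root of x (find with fuel n)
def pvRt (par : PySem.Dict Int Int) (n : Int) (x : Int) : Int := pvFind par n.toNat x

-- the union-find invariant: pointers stay in range, every chain reaches a root within the
-- non-root count, and two vertices share a root exactly when the processed edges relate them
def pvUF (n : Int) (par : PySem.Dict Int Int) (R : Int → Int → Prop) : Prop :=
  (∀ x, pvInR n x → pvInR n (pvP par x)) ∧
  (∀ x, pvInR n x → ∃ k, k ≤ pvCnt n par ∧ pvIsRoot par ((pvP par)^[k] x)) ∧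
  (∀ x y, pvInR n x → pvInR n y →
    (pvRt par n x = pvRt par n y ↔ Relation.EqvGen R x y))

lemma pvIterR (n : Int) (par : PySem.Dict Int Int)
    (h1 : ∀ x, pvInR n x → pvInR n (pvP par x)) :
    ∀ (k : Nat) (x : Int), pvInR n x → pvInR n ((pvP par)^[k] x) := by
  intro k
  induction k with
  | zero => intro x hx; simpa using hx
  | succ j ih =>
    intro x hx
    rw [Function.iterate_succ_apply]
    exact ih (pvP par x) (h1 x hx)

-- a root finds itself
lemma pvRtRoot (par : PySem.Dict Int Int) (n : Int) (x : Int) (hx : pvIsRoot par x) :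
    pvRt par n x = x := pvFind_spec par n.toNat 0 x (Nat.zero_le _) hx

-- under the invariant: the root is in range, is a root, and is a chain iterate
lemma pvRtSpec (n : Int) (par : PySem.Dict Int Int) (R : Int → Int → Prop)
    (h : pvUF n par R) (x : Int) (hx : pvInR n x) :
    pvInR n (pvRt par n x) ∧ pvIsRoot par (pvRt par n x) ∧
    ∃ k, k ≤ pvCnt n par ∧ pvRt par n x = (pvP par)^[k] x := by
  obtain ⟨k, hk, hroot⟩ := h.2.1 x hx
  have hfind := pvFind_spec par n.toNat k x (hk.trans (pvCnt_le n par)) hroot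
  refine ⟨?_, ?_, k, hk, hfind⟩
  · rw [pvRt, hfind]; exact pvIterR n par h.1 k x hx
  · rw [pvRt, hfind]; exact hroot


-- ===== generated-equivalence bookkeeping =====

lemma pvEqvGenIff {R R' : Int → Int → Prop} (h : ∀ a b, R a b ↔ R' a b) (x y : Int) :
    Relation.EqvGen R x y ↔ Relation.EqvGen R' x y :=
  ⟨Relation.EqvGen.mono (fun a b hab => (h a b).mp hab),
   Relation.EqvGen.mono (fun a b hab => (h a b).mpr hab)⟩

lemma pvEqvGenFalse (x y : Int) : Relation.EqvGen (fun _ _ => False) x y ↔ x = y := by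
  constructor
  · intro h
    induction h with
    | rel a b hab => exact absurd hab (by simp)
    | refl a => rfl
    | symm a b _ ih => exact ih.symm
    | trans a b c _ _ ih1 ih2 => exact ih1.trans ih2
  · rintro rfl
    exact Relation.EqvGen.refl x

-- adding one edge (v, u) to the generator merges exactly the classes of v and u
lemma pvEqvGenUnion (R : Int → Int → Prop) (v u x y : Int) :
    Relation.EqvGen (fun a b => R a b ∨ (a = v ∧ b = u)) x y ↔
      (Relation.EqvGen R x y ∨
        (Relation.EqvGen R x v ∧ Relation.EqvGen R u y) ∨
        (Relation.EqvGen R x u ∧ Relation.EqvGen R v y)) := by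
  constructor
  · intro h
    induction h with
    | rel a b hab =>
      rcases hab with hr | ⟨rfl, rfl⟩
      · exact Or.inl (Relation.EqvGen.rel _ _ hr)
      · exact Or.inr (Or.inl ⟨Relation.EqvGen.refl _, Relation.EqvGen.refl _⟩)
    | refl a => exact Or.inl (Relation.EqvGen.refl a)
    | symm a b _ ih =>
      rcases ih with h1 | ⟨h1, h2⟩ | ⟨h1, h2⟩
      · exact Or.inl (Relation.EqvGen.symm _ _ h1)
      · exact Or.inr (Or.inr ⟨Relation.EqvGen.symm _ _ h2, Relation.EqvGen.symm _ _ h1⟩)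
      · exact Or.inr (Or.inl ⟨Relation.EqvGen.symm _ _ h2, Relation.EqvGen.symm _ _ h1⟩)
    | trans a b c _ _ ih1 ih2 =>
      have tr : ∀ {x y z : Int}, Relation.EqvGen R x y → Relation.EqvGen R y z →
          Relation.EqvGen R x z := fun h1 h2 => Relation.EqvGen.trans _ _ _ h1 h2
      have sy : ∀ {x y : Int}, Relation.EqvGen R x y → Relation.EqvGen R y x :=
        fun h => Relation.EqvGen.symm _ _ h
      rcases ih1 with h1 | ⟨h1, h2⟩ | ⟨h1, h2⟩ <;>
        rcases ih2 with h3 | ⟨h3, h4⟩ | ⟨h3, h4⟩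
      · exact Or.inl (tr h1 h3)
      · exact Or.inr (Or.inl ⟨tr h1 h3, h4⟩)
      · exact Or.inr (Or.inr ⟨tr h1 h3, h4⟩)
      · exact Or.inr (Or.inl ⟨h1, tr h2 h3⟩)
      · exact Or.inl (tr (tr h1 (sy (tr h2 h3))) h4)
      · exact Or.inl (tr h1 h4)
      · exact Or.inr (Or.inr ⟨h1, tr h2 h3⟩)
      · exact Or.inl (tr h1 h4)
      · exact Or.inr (Or.inr ⟨h1, h4⟩)
  · rintro (h | ⟨h1, h2⟩ | ⟨h1, h2⟩)
    · exact Relation.EqvGen.mono (fun a b hab => Or.inl hab) h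
    · have e : Relation.EqvGen (fun a b => R a b ∨ (a = v ∧ b = u)) v u :=
        Relation.EqvGen.rel _ _ (Or.inr ⟨rfl, rfl⟩)
      exact Relation.EqvGen.trans _ _ _
        (Relation.EqvGen.trans _ _ _
          (Relation.EqvGen.mono (fun a b hab => Or.inl hab) h1) e)
        (Relation.EqvGen.mono (fun a b hab => Or.inl hab) h2)
    · have e : Relation.EqvGen (fun a b => R a b ∨ (a = v ∧ b = u)) u v :=
        Relation.EqvGen.symm _ _ (Relation.EqvGen.rel _ _ (Or.inr ⟨rfl, rfl⟩))
      exact Relation.EqvGen.trans _ _ _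
        (Relation.EqvGen.trans _ _ _
          (Relation.EqvGen.mono (fun a b hab => Or.inl hab) h1) e)
        (Relation.EqvGen.mono (fun a b hab => Or.inl hab) h2)

-- flipping one list element from false to true raises the count by one
lemma pvCountBump {α : Type} [DecidableEq α] (l : List α) (hl : l.Nodup) (p p' : α → Bool) (a : α)
    (ha : a ∈ l) (hpa : p a = false) (hpa' : p' a = true)
    (hagree : ∀ x ∈ l, x ≠ a → p' x = p x) :
    l.countP p' = l.countP p + 1 := by
  induction l with
  | nil => simp at ha
  | cons b t ih =>
    rcases List.mem_cons.mp ha with rfl | hat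
    · have hnot : a ∉ t := (List.nodup_cons.mp hl).1
      have : t.countP p' = t.countP p := by
        apply List.countP_congr
        intro x hx
        rw [hagree x (List.mem_cons_of_mem _ hx) (fun h => hnot (h ▸ hx))]
      simp [hpa, hpa', this]
    · have hba : b ≠ a := fun h => (List.nodup_cons.mp hl).1 (h ▸ hat)
      have hrec := ih (List.nodup_cons.mp hl).2 hat
        (fun x hx hxa => hagree x (List.mem_cons_of_mem _ hx) hxa)
      have hb : p' b = p b := hagree b (List.mem_cons_self ..) hba
      rw [List.countP_cons, List.countP_cons, hrec, hb]
      omega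


-- make pvCountBump generic duties explicit for Int lists only (used with the cast range list below)

lemma pvIterCongr (f f' : Int → Int) (h : ∀ x, f' x = f x) :
    ∀ (k : Nat) (x : Int), f'^[k] x = f^[k] x := by
  intro k
  induction k with
  | zero => intro x; rfl
  | succ j ih =>
    intro x
    rw [Function.iterate_succ_apply, Function.iterate_succ_apply, h, ih]

-- one union `parent[find(u)] = find(v)` preserves the invariant, with the edge (v, u) added
lemma pvUnion (n : Int) (par : PySem.Dict Int Int) (R : Int → Int → Prop)
    (h : pvUF n par R) (v u : Int) (hv : pvInR n v) (hu : pvInR n u) :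
    pvUF n (pvUnionStep n.toNat par v u) (fun a b => R a b ∨ (a = v ∧ b = u)) := by
  obtain ⟨hP, hChain, hClass⟩ := h
  obtain ⟨hruR, hruRoot, _⟩ := pvRtSpec n par R ⟨hP, hChain, hClass⟩ u hu
  obtain ⟨hrvR, hrvRoot, _⟩ := pvRtSpec n par R ⟨hP, hChain, hClass⟩ v hv
  have hstep : pvUnionStep n.toNat par v u
      = PySem.Dict.insert par (pvRt par n u) (pvRt par n v) := rfl
  rw [hstep]
  set ru := pvRt par n u with hru
  set rv := pvRt par n v with hrv
  set ins := PySem.Dict.insert par ru rv with hins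
  have hp' : ∀ x, pvP ins x = if x = ru then rv else pvP par x := fun x => pvP_insert par ru rv x
  have tr : ∀ {x y z : Int}, Relation.EqvGen R x y → Relation.EqvGen R y z →
      Relation.EqvGen R x z := fun h1 h2 => Relation.EqvGen.trans _ _ _ h1 h2
  have sy : ∀ {x y : Int}, Relation.EqvGen R x y → Relation.EqvGen R y x :=
    fun h => Relation.EqvGen.symm _ _ h
  have hxuIff : ∀ x, pvInR n x → (pvRt par n x = ru ↔ Relation.EqvGen R x u) :=
    fun x hx => hClass x u hx hu
  have hxvIff : ∀ x, pvInR n x → (pvRt par n x = rv ↔ Relation.EqvGen R x v) :=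
    fun x hx => hClass x v hx hv
  by_cases heq : ru = rv
  · -- find(u) == find(v): the insert rewrites parent[ru] with its own value, nothing changes
    have hpp : ∀ x, pvP ins x = pvP par x := by
      intro x
      rw [hp']
      split
      · rename_i hxr
        subst hxr
        rw [← heq, hruRoot]
      · rfl
    have hfind : ∀ x, pvRt ins n x = pvRt par n x := fun x => pvFindCongr par ins hpp n.toNat x
    have hvu : Relation.EqvGen R v u := by
      rw [← hxuIff v hv]
      exact (heq.trans hrv).symm
    have hcnt : pvCnt n ins = pvCnt n par := by
      unfold pvCnt
      apply List.countP_congr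
      intro i _
      rw [hpp]
    refine ⟨?_, ?_, ?_⟩
    · intro x hx
      rw [hpp]
      exact hP x hx
    · intro x hx
      obtain ⟨k, hk, hroot⟩ := hChain x hx
      refine ⟨k, by rw [hcnt]; exact hk, ?_⟩
      unfold pvIsRoot
      rw [pvIterCongr _ _ hpp, hpp]
      exact hroot
    · intro x y hx hy
      rw [hfind, hfind, hClass x y hx hy, pvEqvGenUnion]
      constructor
      · exact fun hh => Or.inl hh
      · rintro (hh | ⟨h1, h2⟩ | ⟨h1, h2⟩)
        · exact hh
        · exact tr (tr h1 hvu) h2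
        · exact tr (tr h1 (sy hvu)) h2
  · -- distinct roots: parent[ru] := rv really merges
    have hroot' : pvIsRoot ins rv := by
      unfold pvIsRoot
      rw [hp', if_neg (fun hh : rv = ru => heq hh.symm)]
      exact hrvRoot
    -- a chain that ends at a root other than ru is untouched
    have hstable : ∀ (k : Nat) (x r : Int), (pvP par)^[k] x = r → pvIsRoot par r → r ≠ ru →
        (pvP ins)^[k] x = r := by
      intro k
      induction k with
      | zero => intro x r hxr _ _; exact hxr
      | succ j ih =>
        intro x r hxr hr hrne
        by_cases hxru : x = ru
        · subst hxru
          rw [Function.iterate_fixed hruRoot] at hxr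
          exact (hrne hxr.symm).elim
        · rw [Function.iterate_succ_apply] at hxr ⊢
          rw [hp', if_neg hxru]
          exact ih (pvP par x) r hxr hr hrne
    -- a chain that ends at ru now continues to rv (one extra step)
    have htorv : ∀ (k : Nat) (x : Int), (pvP par)^[k] x = ru →
        ∃ j ≤ k + 1, (pvP ins)^[j] x = rv := by
      intro k
      induction k with
      | zero =>
        intro x hxr
        simp only [Function.iterate_zero, id_eq] at hxr
        refine ⟨1, le_refl _, ?_⟩
        rw [Function.iterate_one, hp', if_pos hxr]
      | succ j ih =>
        intro x hxr
        by_cases hxru : x = ru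
        · refine ⟨1, by omega, ?_⟩
          rw [Function.iterate_one, hp', if_pos hxru]
        · rw [Function.iterate_succ_apply] at hxr
          obtain ⟨j2, hj2, hj2e⟩ := ih (pvP par x) hxr
          refine ⟨j2 + 1, by omega, ?_⟩
          rw [Function.iterate_succ_apply, hp', if_neg hxru]
          exact hj2e
    have hcnt : pvCnt n ins = pvCnt n par + 1 := by
      unfold pvCnt
      refine pvCountBump (List.range n.toNat) List.nodup_range
        (fun i => decide (pvP par (i : Int) ≠ (i : Int)))
        (fun i => decide (pvP ins (i : Int) ≠ (i : Int))) ru.toNat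
        (List.mem_range.mpr (by omega)) ?_ ?_ ?_
      · simp only [decide_eq_false_iff_not, not_not]
        rw [Int.toNat_of_nonneg hruR.1]
        exact hruRoot
      · simp only [decide_eq_true_eq]
        rw [Int.toNat_of_nonneg hruR.1, hp', if_pos rfl]
        exact fun hh => heq hh.symm
      · intro x _ hxne
        have hxru : (x : Int) ≠ ru := by
          intro hh
          apply hxne
          omega
        show decide (pvP ins (x : Int) ≠ (x : Int)) = decide (pvP par (x : Int) ≠ (x : Int))
        rw [hp', if_neg hxru]
    -- the new root function
    have hrt' : ∀ x, pvInR n x →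
        pvRt ins n x = if pvRt par n x = ru then rv else pvRt par n x := by
      intro x hx
      obtain ⟨_, hxroot, k, hk, hfind⟩ := pvRtSpec n par R ⟨hP, hChain, hClass⟩ x hx
      by_cases hxr : pvRt par n x = ru
      · rw [if_pos hxr]
        obtain ⟨j, hj, hje⟩ := htorv k x (by rw [← hfind, hxr])
        have hjn : j ≤ n.toNat := by
          have h1 : pvCnt n ins ≤ n.toNat := pvCnt_le n ins
          omega
        exact pvFind_spec ins n.toNat j x hjn (by unfold pvIsRoot; rw [hje]; exact hroot') |>.trans hje
      · rw [if_neg hxr]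
        have hstab := hstable k x (pvRt par n x) hfind.symm hxroot hxr
        have hkn : k ≤ n.toNat := hk.trans (pvCnt_le n par)
        exact pvFind_spec ins n.toNat k x hkn
          (by
            unfold pvIsRoot
            rw [hstab, hp', if_neg hxr]
            exact hxroot) |>.trans hstab
    refine ⟨?_, ?_, ?_⟩
    · intro x hx
      rw [hp']
      split
      · exact hrvR
      · exact hP x hx
    · intro x hx
      obtain ⟨k, hk, hroot⟩ := hChain x hx
      by_cases hxr : (pvP par)^[k] x = ru
      · obtain ⟨j, hj, hje⟩ := htorv k x hxr
        refine ⟨j, by omega, ?_⟩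
        unfold pvIsRoot
        rw [hje]
        exact hroot'
      · refine ⟨k, by omega, ?_⟩
        have hstab := hstable k x _ rfl hroot hxr
        unfold pvIsRoot
        rw [hstab, hp', if_neg hxr]
        exact hroot
    · intro x y hx hy
      rw [hrt' x hx, hrt' y hy, pvEqvGenUnion]
      have hyuIff := hxuIff y hy
      have hyvIff := hxvIff y hy
      have hxu := hxuIff x hx
      have hxv := hxvIff x hx
      by_cases hxru : pvRt par n x = ru <;> by_cases hyru : pvRt par n y = ru
      · rw [if_pos hxru, if_pos hyru]
        constructor
        · intro _
          exact Or.inl (tr (hxu.mp hxru) (sy (hyuIff.mp hyru)))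
        · intro _
          rfl
      · rw [if_pos hxru, if_neg hyru]
        have hxuE : Relation.EqvGen R x u := hxu.mp hxru
        have hnyu : ¬ Relation.EqvGen R y u := fun hh => hyru (hyuIff.mpr hh)
        constructor
        · intro hh
          exact Or.inr (Or.inr ⟨hxuE, sy ((hyvIff.mp hh.symm))⟩)
        · rintro (hh | ⟨h1, h2⟩ | ⟨h1, h2⟩)
          · exact absurd (tr (sy hh) hxuE) hnyu
          · exact absurd (sy h2) hnyu
          · exact (hyvIff.mpr (sy h2)).symm
      · rw [if_neg hxru, if_pos hyru]
        have hyuE : Relation.EqvGen R y u := hyuIff.mp hyru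
        have hnxu : ¬ Relation.EqvGen R x u := fun hh => hxru (hxu.mpr hh)
        constructor
        · intro hh
          exact Or.inr (Or.inl ⟨hxv.mp hh, sy hyuE⟩)
        · rintro (hh | ⟨h1, h2⟩ | ⟨h1, h2⟩)
          · exact absurd (tr hh hyuE) hnxu
          · exact hxv.mpr h1
          · exact absurd h1 hnxu
      · rw [if_neg hxru, if_neg hyru]
        have hnxu : ¬ Relation.EqvGen R x u := fun hh => hxru (hxu.mpr hh)
        have hnyu : ¬ Relation.EqvGen R y u := fun hh => hyru (hyuIff.mpr hh)
        rw [hClass x y hx hy]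
        constructor
        · exact fun hh => Or.inl hh
        · rintro (hh | ⟨h1, h2⟩ | ⟨h1, h2⟩)
          · exact hh
          · exact absurd (sy h2) hnyu
          · exact absurd h1 hnxu


-- the initial dict {i: i for i in range(n)} denotes the identity pointer function
lemma pvPInitAux (l : List Int) (d : PySem.Dict Int Int) (hd : ∀ x, pvP d x = x) :
    ∀ x, pvP (l.foldl (fun d i => PySem.Dict.insert d i i) d) x = x := by
  induction l generalizing d with
  | nil => exact hd
  | cons i t ih =>
    simp only [List.foldl_cons]
    refine ih (PySem.Dict.insert d i i) ?_
    intro x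
    rw [pvP_insert]
    split
    · rename_i hh; exact hh.symm
    · exact hd x

lemma pvUFInit (n : Int) :
    pvUF n ((PySem.List.pyRange 0 n 1).foldl (fun d i => PySem.Dict.insert d i i)
      PySem.Dict.empty) (fun _ _ => False) := by
  have hid : ∀ x, pvP ((PySem.List.pyRange 0 n 1).foldl
      (fun d i => PySem.Dict.insert d i i) PySem.Dict.empty) x = x := by
    refine pvPInitAux _ _ ?_
    intro x
    unfold pvP
    rw [PySem.Dict.getD_empty]
  refine ⟨?_, ?_, ?_⟩
  · intro x hx
    rw [hid]
    exact hx
  · intro x hx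
    exact ⟨0, Nat.zero_le _, by unfold pvIsRoot; simpa using hid x⟩
  · intro x y hx hy
    have hrt : ∀ z, pvRt _ n z = z := fun z => pvRtRoot _ n z (hid z)
    rw [hrt, hrt, pvEqvGenFalse]

-- processing a whole edge list preserves the invariant, accumulating the edges
lemma pvUFFold (n : Int) :
    ∀ (EL : List (Int × Int)) (par : PySem.Dict Int Int) (R : Int → Int → Prop),
    pvUF n par R → (∀ e ∈ EL, pvInR n e.1 ∧ pvInR n e.2) →
    pvUF n (EL.foldl (fun par e => pvUnionStep n.toNat par e.1 e.2) par)
      (fun a b => R a b ∨ (a, b) ∈ EL) := by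
  intro EL
  induction EL with
  | nil =>
    intro par R h _
    simp only [List.foldl_nil]
    have := h.2.2
    refine ⟨h.1, h.2.1, ?_⟩
    intro x y hx hy
    rw [this x y hx hy]
    exact pvEqvGenIff (by simp) x y
  | cons e t ih =>
    intro par R h hEL
    simp only [List.foldl_cons]
    have he := hEL e (List.mem_cons_self ..)
    have hstep := pvUnion n par R h e.1 e.2 he.1 he.2
    have hrec := ih (pvUnionStep n.toNat par e.1 e.2) _ hstep
      (fun e' he' => hEL e' (List.mem_cons_of_mem _ he'))
    refine ⟨hrec.1, hrec.2.1, ?_⟩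
    intro x y hx hy
    rw [hrec.2.2 x y hx hy]
    refine pvEqvGenIff ?_ x y
    intro a b
    constructor
    · rintro ((hr | ⟨rfl, rfl⟩) | ht)
      · exact Or.inl hr
      · exact Or.inr (List.mem_cons_self ..)
      · exact Or.inr (List.mem_cons_of_mem _ ht)
    · rintro (hr | hm)
      · exact Or.inl (Or.inl hr)
      · rcases List.mem_cons.mp hm with hh | ht
        · exact Or.inl (Or.inr (by cases hh; exact ⟨rfl, rfl⟩))
        · exact Or.inr ht

-- flattening the nested for-loops over vertices and their neighbour lists into one edge list
lemma pvFoldFlatten {σ : Type} (l : List Int) (g : Int → List Int)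
    (F : σ → Int → Int → σ) (d : σ) :
    l.foldl (fun s v => (g v).foldl (fun s u => F s v u) s) d
      = (l.flatMap (fun v => (g v).map (fun u => (v, u)))).foldl
          (fun s e => F s e.1 e.2) d := by
  induction l generalizing d with
  | nil => rfl
  | cons v t ih =>
    simp only [List.foldl_cons, List.flatMap_cons, List.foldl_append]
    rw [ih]
    congr 1
    rw [List.foldl_map]


-- ===== connectivity on the graph, and A's outer loop =====

-- one undirected-graph edge step between in-range vertices
def pvE (g : Int → List Int) (n : Int) (x y : Int) : Prop :=
  pvInR n x ∧ pvInR n y ∧ y ∈ g x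

-- a residual flood path is a graph path
lemma pvRelToConn (g : Int → List Int) (n : Int) (m : Int → Bool) (a x : Int)
    (h : Relation.ReflTransGen (pvRel g n m) a x) (ha : pvInR n a) :
    Relation.ReflTransGen (pvE g n) a x ∧ pvInR n x := by
  induction h with
  | refl => exact ⟨Relation.ReflTransGen.refl, ha⟩
  | tail h1 h2 ih => exact ⟨ih.1.tail ⟨ih.2, h2.2.1, h2.1⟩, h2.2.1⟩

-- flooding from a fresh vertex m over a closed marked set M marks exactly M ∪ (component of m)
lemma pvFloodConn (g : Int → List Int) (n : Int)
    (hg : ∀ u, pvInR n u → ∀ v ∈ g u, pvInR n v)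
    (vis : List Bool) (hlen : (vis.length : Int) = n)
    (M : Int → Prop) (hM : ∀ x, pvMark n vis x = true ↔ M x)
    (hMcl : ∀ x y, M x → pvE g n x y → M y)
    (m : Int) (hm : pvInR n m) (hnm : ¬ M m) :
    (pvFloodA g (vis.set m.toNat true) [m]).length = vis.length ∧
    (∀ x, pvMark n (pvFloodA g (vis.set m.toNat true) [m]) x = true ↔
      (M x ∨ Relation.ReflTransGen (pvE g n) m x)) := by
  have hlen' : ((vis.set m.toNat true).length : Int) = n := by
    rw [List.length_set]; exact hlen
  have hmark' : ∀ x, pvMark n (vis.set m.toNat true) x = true ↔ (M x ∨ x = m) := by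
    intro x
    rw [pvMarkSet n vis m x hm hlen]
    simp [hM]
  obtain ⟨hflen, hfm⟩ := pvFloodASpec g n hg (vis.set m.toNat true) [m] hlen'
    (fun w hw => by
      rw [List.mem_singleton] at hw
      rw [hw]
      exact ⟨hm, (hmark' m).mpr (Or.inr rfl)⟩)
  refine ⟨by rw [hflen, List.length_set], ?_⟩
  intro x
  rw [hfm x]
  unfold pvReach
  constructor
  · rintro (hx | ⟨w, hw, hp⟩)
    · rcases (hmark' x).mp hx with h1 | rfl
      · exact Or.inl h1
      · exact Or.inr Relation.ReflTransGen.refl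
    · rw [List.mem_singleton] at hw
      subst hw
      exact Or.inr (pvRelToConn g n _ w x hp hm).1
  · -- a graph path from m stays inside M ∪ (reach avoiding the new marks)
    have hcl : ∀ x, Relation.ReflTransGen (pvE g n) m x →
        (M x ∨ Relation.ReflTransGen (pvRel g n (pvMark n (vis.set m.toNat true))) m x) := by
      intro x hx
      induction hx with
      | refl => exact Or.inr Relation.ReflTransGen.refl
      | tail h1 h2 ih =>
        rename_i b c
        rcases ih with hMb | hRb
        · exact Or.inl (hMcl b c hMb h2)
        · by_cases hc : pvMark n (vis.set m.toNat true) c = true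
          · rcases (hmark' c).mp hc with h3 | rfl
            · exact Or.inl h3
            · exact Or.inr Relation.ReflTransGen.refl
          · exact Or.inr (hRb.tail ⟨h2.2.2, h2.2.1, by simpa using hc⟩)
    rintro (hx | hx)
    · exact Or.inl ((hmark' x).mpr (Or.inl hx))
    · rcases hcl x hx with h1 | h2
      · exact Or.inl ((hmark' x).mpr (Or.inl h1))
      · exact Or.inr ⟨m, List.mem_singleton.mpr rfl, h2⟩

-- A's outer loop over the first m vertices
def pvAFold (g : Int → List Int) (n : Int) (m : Nat) : List Bool × Int :=
  ((List.range m).map (fun k : Nat => (k : Int))).foldl (pvOutA g)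
    (List.replicate n.toNat false, (0 : Int))

-- A's outer loop: marks = reachable from a processed vertex; comp counts the vertices whose
-- component contains no smaller vertex (Q j decides 'some s < j is connected to j')
lemma pvAOuter (g : Int → List Int) (n : Int)
    (hg : ∀ u, pvInR n u → ∀ v ∈ g u, pvInR n v)
    (Q : Int → Bool)
    (hQ : ∀ j : Int, pvInR n j → (Q j = true ↔
      ∃ s : Int, 0 ≤ s ∧ s < j ∧ Relation.ReflTransGen (pvE g n) s j)) :
    ∀ m : Nat, (m : Int) ≤ n →
    (((pvAFold g n m).1.length : Int) = n) ∧
    (∀ x, pvMark n (pvAFold g n m).1 x = true ↔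
      ∃ s : Int, 0 ≤ s ∧ s < (m : Int) ∧ Relation.ReflTransGen (pvE g n) s x) ∧
    (pvAFold g n m).2 = ((List.range m).countP (fun k : Nat => !(Q (k : Int))) : Int) := by
  intro m
  induction m with
  | zero =>
    intro h0
    push_cast at h0
    have hA : pvAFold g n 0 = (List.replicate n.toNat false, (0 : Int)) := by
      simp [pvAFold]
    rw [hA]
    refine ⟨by simp; omega, ?_, by simp⟩
    intro x
    constructor
    · intro hx
      unfold pvMark at hx
      have hz : (List.replicate n.toNat false).getD x.toNat false = false := by
        simp [List.getD_eq_getElem?_getD, List.getElem?_replicate]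
        split <;> simp
      rw [hz] at hx
      simp at hx
    · rintro ⟨s, hs0, hs1, _⟩
      push_cast at hs1
      omega
  | succ m ih =>
    intro hm1
    have hmn : (m : Int) < n := by push_cast at hm1 ⊢; omega
    have hmR : pvInR n (m : Int) := ⟨by positivity, hmn⟩
    obtain ⟨ihlen, ihmark, ihcomp⟩ := ih (by push_cast at hm1 ⊢; omega)
    have hstep : pvAFold g n (m + 1) = pvOutA g (pvAFold g n m) (m : Int) := by
      unfold pvAFold
      rw [List.range_succ, List.map_append, List.foldl_append]
      rfl
    have hmarkm : pvMark n (pvAFold g n m).1 (m : Int)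
        = (pvAFold g n m).1.getD ((m : Int)).toNat false := by
      unfold pvMark
      simp [hmR]
    by_cases hMk : (pvAFold g n m).1.getD ((m : Int)).toNat false = false
    · -- m unvisited: flood, comp + 1
      have hnm : ¬ ∃ s : Int, 0 ≤ s ∧ s < (m : Int) ∧
          Relation.ReflTransGen (pvE g n) s (m : Int) := by
        rw [← ihmark, hmarkm, hMk]
        simp
      have hout : pvOutA g (pvAFold g n m) (m : Int)
          = (pvFloodA g ((pvAFold g n m).1.set ((m : Int)).toNat true) [(m : Int)],
             (pvAFold g n m).2 + 1) := by
        unfold pvOutA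
        rw [if_pos hMk]
      obtain ⟨flen, fmark⟩ := pvFloodConn g n hg (pvAFold g n m).1 ihlen
        (fun x => ∃ s : Int, 0 ≤ s ∧ s < (m : Int) ∧ Relation.ReflTransGen (pvE g n) s x)
        ihmark
        (fun x y ⟨s, h1, h2, h3⟩ hxy => ⟨s, h1, h2, h3.tail hxy⟩)
        (m : Int) hmR hnm
      rw [hstep, hout]
      refine ⟨?_, ?_, ?_⟩
      · show ((pvFloodA g ((pvAFold g n m).1.set ((m : Int)).toNat true)
            [(m : Int)]).length : Int) = n
        rw [flen]
        exact ihlen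
      · intro x
        show pvMark n (pvFloodA g ((pvAFold g n m).1.set ((m : Int)).toNat true)
            [(m : Int)]) x = true ↔ _
        rw [fmark x]
        constructor
        · rintro (⟨s, h1, h2, h3⟩ | hc)
          · exact ⟨s, h1, by push_cast at h2 ⊢; omega, h3⟩
          · exact ⟨(m : Int), by positivity, by push_cast; omega, hc⟩
        · rintro ⟨s, h1, h2, h3⟩
          by_cases hsm : s = (m : Int)
          · exact Or.inr (hsm ▸ h3)
          · exact Or.inl ⟨s, h1, by push_cast at h2 ⊢; omega, h3⟩
      · show (pvAFold g n m).2 + 1 = _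
        rw [ihcomp, List.range_succ, List.countP_append]
        have hQm : Q (m : Int) = false := by
          rcases hq : Q (m : Int) with _ | _
          · rfl
          · exact absurd ((hQ (m : Int) hmR).mp hq) hnm
        simp [hQm]
    · -- m already visited: skip
      have hmk : (pvAFold g n m).1.getD ((m : Int)).toNat false = true := by
        cases h : (pvAFold g n m).1.getD ((m : Int)).toNat false
        · exact absurd h hMk
        · rfl
      have hex : ∃ s : Int, 0 ≤ s ∧ s < (m : Int) ∧
          Relation.ReflTransGen (pvE g n) s (m : Int) := by
        rw [← ihmark, hmarkm, hmk]
      have hout : pvOutA g (pvAFold g n m) (m : Int) = pvAFold g n m := by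
        unfold pvOutA
        rw [if_neg (by rw [hmk]; simp)]
      rw [hstep, hout]
      refine ⟨ihlen, ?_, ?_⟩
      · intro x
        rw [ihmark x]
        constructor
        · rintro ⟨s, h1, h2, h3⟩
          exact ⟨s, h1, by push_cast at h2 ⊢; omega, h3⟩
        · rintro ⟨s, h1, h2, h3⟩
          by_cases hsm : s = (m : Int)
          · obtain ⟨s0, g1, g2, g3⟩ := hex
            exact ⟨s0, g1, g2, g3.trans (hsm ▸ h3)⟩
          · exact ⟨s, h1, by push_cast at h2 ⊢; omega, h3⟩
      · rw [ihcomp, List.range_succ, List.countP_append]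
        have hQm : Q (m : Int) = true := (hQ (m : Int) hmR).mpr hex
        simp [hQm]


-- counting the distinct in-range keys: at least n of them means every vertex 0..n-1 is a key
lemma pvCoverage (n : Int) (S : List Int) (hnd : S.Nodup) (hmem : ∀ x ∈ S, 0 ≤ x ∧ x < n)
    (hlen : n ≤ (S.length : Int)) : ∀ i : Int, 0 ≤ i → i < n → i ∈ S := by
  intro i h0 h1
  have hsub : S.toFinset ⊆ Finset.Ico (0 : Int) n := by
    intro x hx
    rw [List.mem_toFinset] at hx
    rw [Finset.mem_Ico]
    exact hmem x hx
  have hcard : (Finset.Ico (0 : Int) n).card ≤ S.toFinset.card := by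
    rw [List.toFinset_card_of_nodup hnd, Int.card_Ico]
    omega
  have heq := Finset.eq_of_subset_of_card_le hsub hcard
  have : i ∈ S.toFinset := by
    rw [heq, Finset.mem_Ico]
    exact ⟨h0, h1⟩
  rwa [List.mem_toFinset] at this

-- ===== counting: roots are one per component, as are per-component minima =====

-- B's counting loop is a countP
lemma pvFoldCount (l : List Int) (q : Int → Prop) [DecidablePred q] (c : Int) :
    l.foldl (fun c i => c + (if q i then 1 else 0)) c
      = c + (l.countP (fun i => decide (q i)) : Int) := by
  induction l generalizing c with
  | nil => simp
  | cons i t ih =>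
    simp only [List.foldl_cons, List.countP_cons, ih]
    by_cases h : q i
    · simp [h]
      ring
    · simp [h]

lemma pvCountCard (m : Nat) (p : Nat → Bool) :
    (List.range m).countP p = ((Finset.range m).filter (fun i => p i = true)).card := by
  simp [List.countP_eq_length_filter, Finset.filter, Finset.range, Multiset.range]

-- an idempotent self-map of range m has as many fixpoints as fiber-minima
lemma pvCardBij (m : Nat) (f : Nat → Nat) (hf : ∀ i, i < m → f i < m ∧ f (f i) = f i) :
    ((Finset.range m).filter (fun i => f i = i)).card
      = ((Finset.range m).filter (fun i => ∀ s, s < i → f s ≠ f i)).card := by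
  refine (Finset.card_bij (fun a _ => f a) ?_ ?_ ?_).symm
  · intro a ha
    rw [Finset.mem_filter, Finset.mem_range] at ha ⊢
    exact ⟨(hf a ha.1).1, (hf a ha.1).2⟩
  · intro a1 h1 a2 h2 heq
    rw [Finset.mem_filter, Finset.mem_range] at h1 h2
    rcases lt_trichotomy a1 a2 with h | h | h
    · exact absurd heq (h2.2 a1 h)
    · exact h
    · exact absurd heq.symm (h1.2 a2 h)
  · intro b hb
    rw [Finset.mem_filter, Finset.mem_range] at hb
    have hne : ((Finset.range m).filter (fun s => f s = b)).Nonempty :=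
      ⟨b, Finset.mem_filter.mpr ⟨Finset.mem_range.mpr hb.1, hb.2⟩⟩
    set a := ((Finset.range m).filter (fun s => f s = b)).min' hne with hadef
    have hamem := ((Finset.range m).filter (fun s => f s = b)).min'_mem hne
    rw [Finset.mem_filter, Finset.mem_range] at hamem
    refine ⟨a, Finset.mem_filter.mpr ⟨Finset.mem_range.mpr hamem.1, ?_⟩, hamem.2⟩
    intro s hs hcon
    have hsm : s ∈ (Finset.range m).filter (fun s => f s = b) := by
      rw [Finset.mem_filter, Finset.mem_range]
      exact ⟨hs.trans hamem.1, hcon.trans hamem.2⟩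
    have := Finset.min'_le _ s hsm
    omega

lemma pvCountRepr (m : Nat) (f : Nat → Nat) (hf : ∀ i, i < m → f i < m ∧ f (f i) = f i) :
    (List.range m).countP (fun i => decide (f i = i))
      = (List.range m).countP (fun i => decide (∀ s, s < i → f s ≠ f i)) := by
  rw [pvCountCard, pvCountCard]
  simp only [decide_eq_true_eq]
  exact pvCardBij m f hf

-- ===== VERDICT (by name: the statement is the Claim_ definition above) =====
theorem compute_betti1_spec : Claim_equal_compute_betti1 := by
  intro adj n _hDom hPre
  unfold Spec_compute_betti1
  by_cases hn : 0 ≤ n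
  · have hNbrPre : ∀ i : Int, pvInR n i →
        ∀ u ∈ pvNbr adj i, ((0 ≤ u ∧ u < n) ∧ i ∈ pvNbr adj u) := by
      intro i hi u hu
      have hiS : i ∈ PySem.Set.ofList ((adj.map Prod.fst).filter
          (fun k => decide (0 ≤ k ∧ k < n))) := by
        refine pvCoverage n _ (PySem.Set.nodup_ofList _) ?_ hPre.1 i hi.1 hi.2
        intro x hx
        have hx2 := (PySem.Set.mem_ofList _ _).mp hx
        have := List.of_mem_filter hx2
        simpa using this
      have hiK : i ∈ adj.map Prod.fst := by
        have hx2 := (PySem.Set.mem_ofList _ _).mp hiS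
        exact List.mem_of_mem_filter hx2
      exact hPre.2 i hiK ⟨hi.1, hi.2⟩ u hu
    have hg : ∀ u, pvInR n u → ∀ v ∈ pvNbr adj u, pvInR n v := by
      intro u hu v hv
      exact (hNbrPre u hu v hv).1
    have hsym : ∀ u, pvInR n u → ∀ v ∈ pvNbr adj u, u ∈ pvNbr adj v := by
      intro u hu v hv
      exact (hNbrPre u hu v hv).2
    -- the final parent dict, through the flattened edge list
    set g := pvNbr adj with hgdef
    set EL := (PySem.List.pyRange 0 n 1).flatMap (fun v => (g v).map (fun u => (v, u)))
      with hELdef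
    set parent0 := (PySem.List.pyRange 0 n 1).foldl
      (fun d i => PySem.Dict.insert d i i) PySem.Dict.empty with hp0def
    set parentF := (PySem.List.pyRange 0 n 1).foldl
      (fun par v => (g v).foldl (fun par u => pvUnionStep n.toNat par v u) par) parent0
      with hpFdef
    have hflat : parentF = EL.foldl (fun par e => pvUnionStep n.toNat par e.1 e.2) parent0 := by
      rw [hpFdef, hELdef]
      exact pvFoldFlatten (PySem.List.pyRange 0 n 1) g
        (fun par v u => pvUnionStep n.toNat par v u) parent0
    have hELmem : ∀ a b : Int, ((a, b) ∈ EL ↔ (pvInR n a ∧ b ∈ g a)) := by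
      intro a b
      rw [hELdef]
      simp only [List.mem_flatMap, List.mem_map, Prod.mk.injEq]
      constructor
      · rintro ⟨v, hv, u, hu, rfl, rfl⟩
        exact ⟨by
          have := PySem.List.mem_pyRange_one.mp hv
          exact ⟨by omega, by omega⟩, hu⟩
      · rintro ⟨ha, hb⟩
        exact ⟨a, PySem.List.mem_pyRange_one.mpr ⟨ha.1, ha.2⟩, b, hb, rfl, rfl⟩
    have hEL : ∀ e ∈ EL, pvInR n e.1 ∧ pvInR n e.2 := by
      intro e he
      obtain ⟨h1, h2⟩ := (hELmem e.1 e.2).mp he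
      exact ⟨h1, hg e.1 h1 e.2 h2⟩
    have hUF : pvUF n parentF (fun a b => False ∨ (a, b) ∈ EL) := by
      rw [hflat]
      exact pvUFFold n EL parent0 _ (pvUFInit n) hEL
    -- connectivity ↔ shared root
    have hsymE : ∀ a b, pvE g n a b → pvE g n b a := by
      rintro a b ⟨h1, h2, h3⟩
      exact ⟨h2, h1, hsym a h1 b h3⟩
    have hRTGsymm : ∀ a b, Relation.ReflTransGen (pvE g n) a b →
        Relation.ReflTransGen (pvE g n) b a := by
      intro a b h
      induction h with
      | refl => exact Relation.ReflTransGen.refl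
      | tail h1 h2 ih => exact (Relation.ReflTransGen.single (hsymE _ _ h2)).trans ih
    have hEqvConn : ∀ x y : Int, Relation.EqvGen (fun a b => False ∨ (a, b) ∈ EL) x y ↔
        Relation.ReflTransGen (pvE g n) x y := by
      intro x y
      have hstep : ∀ a b : Int, (False ∨ (a, b) ∈ EL) ↔ pvE g n a b := by
        intro a b
        rw [false_or, hELmem a b]
        constructor
        · rintro ⟨h1, h2⟩
          exact ⟨h1, hg a h1 b h2, h2⟩
        · rintro ⟨h1, h2, h3⟩
          exact ⟨h1, h3⟩
      rw [pvEqvGenIff hstep x y]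
      constructor
      · intro h
        induction h with
        | rel a b hab => exact Relation.ReflTransGen.single hab
        | refl a => exact Relation.ReflTransGen.refl
        | symm a b _ ih => exact hRTGsymm _ _ ih
        | trans a b c _ _ ih1 ih2 => exact ih1.trans ih2
      · intro h
        induction h with
        | refl => exact Relation.EqvGen.refl _
        | tail h1 h2 ih => exact Relation.EqvGen.trans _ _ _ ih (Relation.EqvGen.rel _ _ h2)
    have hconn : ∀ x y : Int, pvInR n x → pvInR n y →
        (pvRt parentF n x = pvRt parentF n y ↔ Relation.ReflTransGen (pvE g n) x y) := by
      intro x y hx hy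
      rw [hUF.2.2 x y hx hy]
      exact hEqvConn x y
    -- the Q predicate: 'some s < j shares j's root'
    set Q : Int → Bool := fun j =>
      (PySem.List.pyRange 0 j 1).any (fun s => pvRt parentF n s == pvRt parentF n j)
      with hQdef
    have hQ : ∀ j : Int, pvInR n j → (Q j = true ↔
        ∃ s : Int, 0 ≤ s ∧ s < j ∧ Relation.ReflTransGen (pvE g n) s j) := by
      intro j hj
      rw [hQdef]
      simp only [List.any_eq_true, beq_iff_eq]
      constructor
      · rintro ⟨s, hs, heq⟩
        obtain ⟨hs0, hs1⟩ := PySem.List.mem_pyRange_one.mp hs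
        exact ⟨s, by omega, by omega,
          (hconn s j ⟨by omega, by omega⟩ hj).mp heq⟩
      · rintro ⟨s, hs0, hs1, hcs⟩
        exact ⟨s, PySem.List.mem_pyRange_one.mpr ⟨hs0, hs1⟩,
          (hconn s j ⟨hs0, by omega⟩ hj).mpr hcs⟩
    have hntn : ((n.toNat : Nat) : Int) = n := by omega
    obtain ⟨_, _, hAcomp⟩ := pvAOuter g n hg Q hQ n.toNat (by omega)
    -- bridge pyRange to the Nat range
    have hbridge : PySem.List.pyRange 0 n 1 = (List.range n.toNat).map (fun k : Nat => (k : Int)) := by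
      rw [PySem.List.pyRange_one]
      simp
    -- the root function on Nat indices
    set f : Nat → Nat := fun k => (pvRt parentF n (k : Int)).toNat with hfdef
    have hkR : ∀ k : Nat, k < n.toNat → pvInR n (k : Int) := by
      intro k hk
      exact ⟨by positivity, by omega⟩
    have hrtk : ∀ k : Nat, k < n.toNat →
        pvInR n (pvRt parentF n (k : Int)) ∧ pvIsRoot parentF (pvRt parentF n (k : Int)) := by
      intro k hk
      obtain ⟨h1, h2, _⟩ := pvRtSpec n parentF _ hUF (k : Int) (hkR k hk)
      exact ⟨h1, h2⟩
    have hfcast : ∀ k : Nat, k < n.toNat → ((f k : Nat) : Int) = pvRt parentF n (k : Int) := by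
      intro k hk
      rw [hfdef]
      exact Int.toNat_of_nonneg (hrtk k hk).1.1
    have hf : ∀ i, i < n.toNat → f i < n.toNat ∧ f (f i) = f i := by
      intro i hi
      obtain ⟨hiR, hiRoot⟩ := hrtk i hi
      constructor
      · rw [hfdef]
        simp only []
        omega
      · have h2 : pvRt parentF n ((f i : Nat) : Int) = pvRt parentF n ((i : Nat) : Int) := by
          rw [hfcast i hi]
          exact pvRtRoot parentF n _ hiRoot
        show (pvRt parentF n ((f i : Nat) : Int)).toNat = f i
        rw [h2]
    -- per-vertex equivalences between the two count predicates and f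
    have hroots : ∀ k ∈ List.range n.toNat,
        (decide (PySem.Dict.getD parentF (k : Int) (k : Int) = (k : Int))) = decide (f k = k) := by
      intro k hk
      rw [List.mem_range] at hk
      obtain ⟨hiR, hiRoot⟩ := hrtk k hk
      have hiff : (PySem.Dict.getD parentF (k : Int) (k : Int) = (k : Int)) ↔ f k = k := by
        constructor
        · intro h
          have : pvRt parentF n (k : Int) = (k : Int) := pvRtRoot parentF n _ h
          rw [hfdef]
          simp only []
          omega
        · intro h
          have h2 : pvRt parentF n (k : Int) = (k : Int) := by
            have := hfcast k hk
            omega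
          show pvP parentF (k : Int) = (k : Int)
          rw [← h2]
          exact hiRoot
      by_cases hh : PySem.Dict.getD parentF (k : Int) (k : Int) = (k : Int)
      · simp [hh, hiff.mp hh]
      · have hnf : ¬ f k = k := fun hc => hh (hiff.mpr hc)
        simp [hh, hnf]
    have hmins : ∀ k ∈ List.range n.toNat,
        (!(Q (k : Int))) = decide (∀ s, s < k → f s ≠ f k) := by
      intro k hk
      rw [List.mem_range] at hk
      have hiff : Q (k : Int) = true ↔ ¬ (∀ s, s < k → f s ≠ f k) := by
        rw [hQdef]
        simp only [List.any_eq_true, beq_iff_eq, not_forall]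
        constructor
        · rintro ⟨s, hs, heq⟩
          obtain ⟨hs0, hs1⟩ := PySem.List.mem_pyRange_one.mp hs
          have hsN : s.toNat < k := by omega
          refine ⟨s.toNat, hsN, ?_⟩
          have hcast : ((s.toNat : Nat) : Int) = s := by omega
          rw [hfdef]
          simp only [not_not]
          rw [hcast, heq]
        · rintro ⟨sN, hsN, heq⟩
          rw [not_not] at heq
          refine ⟨(sN : Int), PySem.List.mem_pyRange_one.mpr ⟨by positivity, by omega⟩, ?_⟩
          have h1 := hfcast sN (by omega)
          have h2 := hfcast k hk
          rw [hfdef] at heq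
          simp only [] at heq
          omega
      rcases hq : Q (k : Int) with _ | _
      · have hthis := (not_iff_not.mpr hiff).mp (by simp [hq])
        rw [not_not] at hthis
        simp only [Bool.not_false]
        symm
        rw [decide_eq_true_eq]
        exact hthis
      · have hthis := hiff.mp hq
        simp only [Bool.not_true]
        symm
        rw [decide_eq_false_iff_not]
        exact hthis
    -- assemble: A's component count equals B's root count
    have hAfold : (PySem.List.pyRange 0 n 1).foldl (pvOutA g)
        (List.replicate n.toNat false, (0 : Int)) = pvAFold g n n.toNat := by
      rw [pvAFold, hbridge]
    have hBcount : (PySem.List.pyRange 0 n 1).foldl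
        (fun c i => c + (if PySem.Dict.getD parentF i i = i then 1 else 0)) (0 : Int)
        = ((List.range n.toNat).countP (fun k : Nat => decide (f k = k)) : Int) := by
      rw [pvFoldCount (PySem.List.pyRange 0 n 1)
        (fun i => PySem.Dict.getD parentF i i = i) 0, zero_add, hbridge, List.countP_map]
      congr 1
      exact List.countP_congr (fun k hk => by
        have := hroots k hk
        simpa using this)
    have key : ((PySem.List.pyRange 0 n 1).foldl (pvOutA g)
          (List.replicate n.toNat false, (0 : Int))).2
        = (PySem.List.pyRange 0 n 1).foldl
            (fun c i => c + (if PySem.Dict.getD parentF i i = i then 1 else 0)) (0 : Int) := by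
      rw [hAfold, hBcount, hAcomp]
      congr 1
      rw [List.countP_congr (fun k hk => by rw [hmins k hk]), ← pvCountRepr n.toNat f hf]
    -- both returns share the edge term; the component counts were just proved equal
    show compute_betti1 adj n = compute_betti1_alt adj n
    rw [compute_betti1, compute_betti1_alt]
    simp only [← hgdef, ← hp0def, ← hpFdef]
    rw [key]
  · -- n < 0: range(n) is empty on both sides
    have hnil : PySem.List.pyRange 0 n 1 = [] := PySem.List.pyRange_one_eq_nil (by omega)
    show compute_betti1 adj n = compute_betti1_alt adj n
    rw [compute_betti1, compute_betti1_alt]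
    simp [hnil]
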